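-- pv_equiv track=rewrite | github.com/pypi-data/pypi-mirror-350 | packages/PreKO/preko-0.3.1-py3-none-any.whl/PreKO/InDel.py | _MakeIndelPosInfo
-- ===== SOURCE A (Python) =====
-- def _MakeIndelPosInfo(sRef_needle, sQuery_needle):
--
--     # indel info making.
--     iNeedle_match_pos_ref   = 0
--     iNeedle_match_pos_query = 0
--     iNeedle_insertion       = 0
--     iNeedle_deletion        = 0
--
--     lInsertion_in_read = []  # insertion result [[100, 1], [119, 13]]
--     lDeletion_in_read  = []  # deletion result  [[97, 1], [102, 3]]
--
--     for i, (sRef_nucle, sQuery_nucle) in enumerate(zip(sRef_needle, sQuery_needle)):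
--
--         if sRef_nucle == '-':
--             iNeedle_insertion += 1
--
--         if sQuery_nucle == '-':
--             iNeedle_deletion += 1
--
--         if sRef_nucle in ['A', 'C', 'G', 'T']:
--             if iNeedle_insertion:
--                 lInsertion_in_read.append([iNeedle_match_pos_ref, iNeedle_insertion])
--                 iNeedle_insertion = 0
--             iNeedle_match_pos_ref += 1
--
--         if sQuery_nucle in ['A', 'C', 'G', 'T']:
--             if iNeedle_deletion:
--                 lDeletion_in_read.append([iNeedle_match_pos_query, iNeedle_deletion])
--                 iNeedle_match_pos_query += iNeedle_deletion
--                 iNeedle_deletion = 0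
--             iNeedle_match_pos_query += 1
--
--     return (lInsertion_in_read, lDeletion_in_read)
-- ===== SOURCE B (Python) =====
-- def _gap_entries(s, shift):
--     # prefix[i] = number of '-' characters among s[:i]
--     prefix = [0]
--     t = 0
--     for c in s:
--         if c == '-':
--             t += 1
--         prefix.append(t)
--     # positions of match (A/C/G/T) characters
--     matches = [i for i, c in enumerate(s) if c in 'ACGT']
--     out = []
--     prev = 0
--     acc = 0
--     k = 0
--     for i in matches:
--         d = prefix[i] - prev
--         if d:
--             out.append([k + acc, d])
--             if shift:
--                 acc += d
--         prev = prefix[i]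
--         k += 1
--     return out
--
-- def _MakeIndelPosInfo(sRef_needle, sQuery_needle):
--     n = min(len(sRef_needle), len(sQuery_needle))
--     return (_gap_entries(sRef_needle[:n], False),
--             _gap_entries(sQuery_needle[:n], True))
-- ===== Notes on version B (the rewrite author's own statement) =====
-- stated objective: alternative
-- what changed: Replaces A's single zipped four-counter state machine by a staged algorithm per string: build a dash prefix-sum array and the list of match-character indices, then fold over the match indices reading gap sizes off the prefix sums.
import Mathlib
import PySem

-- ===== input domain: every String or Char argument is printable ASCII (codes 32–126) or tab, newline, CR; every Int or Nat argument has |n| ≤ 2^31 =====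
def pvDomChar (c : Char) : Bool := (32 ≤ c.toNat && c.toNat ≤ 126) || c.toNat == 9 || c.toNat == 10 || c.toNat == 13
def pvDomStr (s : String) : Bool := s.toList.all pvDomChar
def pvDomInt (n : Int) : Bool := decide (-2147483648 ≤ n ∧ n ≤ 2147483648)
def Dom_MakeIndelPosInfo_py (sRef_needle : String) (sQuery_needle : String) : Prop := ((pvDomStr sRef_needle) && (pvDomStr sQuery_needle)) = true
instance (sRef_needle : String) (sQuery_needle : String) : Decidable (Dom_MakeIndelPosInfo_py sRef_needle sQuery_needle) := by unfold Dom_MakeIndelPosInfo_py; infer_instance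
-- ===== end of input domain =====

-- B replaces A's zipped four-counter state machine by, per truncated string, a dash
-- prefix-sum list plus match-index list and a fold over the match indices (alternative
-- decomposition, same cost). Equivalence is about the return value only.


-- ===== PORT A =====
-- one step of A's loop body on the combined state
-- state = (match_pos_ref, match_pos_query, insertion, deletion, lInsertion, lDeletion)
def pvStepA (st : Int × Int × Int × Int × List (List Int) × List (List Int))
    (p : Char × Char) : Int × Int × Int × Int × List (List Int) × List (List Int) :=
  let (ipr, ipq, ins, del, lI, lD) := st
  let ins := if p.1 = '-' then ins + 1 else ins
  let del := if p.2 = '-' then del + 1 else del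
  let (lI, ins, ipr) :=
    if p.1 = 'A' ∨ p.1 = 'C' ∨ p.1 = 'G' ∨ p.1 = 'T' then
      if ins ≠ 0 then (lI ++ [[ipr, ins]], 0, ipr + 1) else (lI, ins, ipr + 1)
    else (lI, ins, ipr)
  let (lD, del, ipq) :=
    if p.2 = 'A' ∨ p.2 = 'C' ∨ p.2 = 'G' ∨ p.2 = 'T' then
      if del ≠ 0 then (lD ++ [[ipq, del]], 0, ipq + del + 1) else (lD, del, ipq + 1)
    else (lD, del, ipq)
  (ipr, ipq, ins, del, lI, lD)

def MakeIndelPosInfo_py (sRef_needle : String) (sQuery_needle : String) :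
    List (List Int) × List (List Int) :=
  let st := (sRef_needle.toList.zip sQuery_needle.toList).foldl pvStepA (0, 0, 0, 0, [], [])
  (st.2.2.2.2.1, st.2.2.2.2.2)

-- ===== PORT B =====
def pvIsACGT (c : Char) : Bool := c = 'A' || c = 'C' || c = 'G' || c = 'T'

-- prefix list of Source B: prefix[i] = number of '-' among s[:i]  (the running-total loop)
def pvPrefix (s : List Char) : List Int :=
  (s.foldl (fun (st : Int × List Int) c =>
      let t := if c = '-' then st.1 + 1 else st.1
      (t, st.2 ++ [t])) (0, [0])).2

-- match-index list of Source B: [i for i, c in enumerate(s) if c in 'ACGT']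
def pvMatchIdx (s : List Char) : List Int :=
  ((PySem.List.enumerate s).filter (fun p => pvIsACGT p.2)).map Prod.fst

-- Source B's final loop over the match indices (prefix[i] is always in range: 0 ≤ i < len(s)+1)
def pvGapLoop (pre : List Int) (shift : Bool) :
    List Int → Int → Int → Int → List (List Int)
  | [], _, _, _ => []
  | i :: rest, k, prev, acc =>
    let pi := PySem.List.pyGetD pre i 0
    let d := pi - prev
    if d ≠ 0 then
      [k + acc, d] :: pvGapLoop pre shift rest (k + 1) pi (if shift then acc + d else acc)
    else
      pvGapLoop pre shift rest (k + 1) pi acc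

def pvGapEntries (s : List Char) (shift : Bool) : List (List Int) :=
  pvGapLoop (pvPrefix s) shift (pvMatchIdx s) 0 0 0

def MakeIndelPosInfo_py_alt (sRef_needle : String) (sQuery_needle : String) :
    List (List Int) × List (List Int) :=
  let n := min sRef_needle.toList.length sQuery_needle.toList.length
  (pvGapEntries (sRef_needle.toList.take n) false,
   pvGapEntries (sQuery_needle.toList.take n) true)

-- ===== PRECONDITION & SPEC =====
def Spec_MakeIndelPosInfo_py (sRef_needle : String) (sQuery_needle : String) (out : List (List Int) × List (List Int)) : Prop := out = MakeIndelPosInfo_py_alt sRef_needle sQuery_needle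
instance (sRef_needle : String) (sQuery_needle : String) (out : List (List Int) × List (List Int)) : Decidable (Spec_MakeIndelPosInfo_py sRef_needle sQuery_needle out) := by unfold Spec_MakeIndelPosInfo_py; infer_instance

-- ===== CLAIM (what is proved, stated in full; the proofs are below) =====
def Claim_equal_MakeIndelPosInfo_py : Prop := ∀ (sRef_needle : String) (sQuery_needle : String), Dom_MakeIndelPosInfo_py sRef_needle sQuery_needle → Spec_MakeIndelPosInfo_py sRef_needle sQuery_needle (MakeIndelPosInfo_py sRef_needle sQuery_needle)

-- ===== LEMMAS AND PROOFS =====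

-- proof-only intermediate state machines (one per output list), used to bridge A and B
def pvInsertions : List Char → Int → Int → List (List Int)
  | [], _, _ => []
  | c :: rest, pos, ins =>
    if c = '-' then pvInsertions rest pos (ins + 1)
    else if c = 'A' ∨ c = 'C' ∨ c = 'G' ∨ c = 'T' then
      if ins ≠ 0 then [pos, ins] :: pvInsertions rest (pos + 1) 0
      else pvInsertions rest (pos + 1) ins
    else pvInsertions rest pos ins

def pvDeletions : List Char → Int → Int → List (List Int)
  | [], _, _ => []
  | c :: rest, pos, del =>
    if c = '-' then pvDeletions rest pos (del + 1)
    else if c = 'A' ∨ c = 'C' ∨ c = 'G' ∨ c = 'T' then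
      if del ≠ 0 then [pos, del] :: pvDeletions rest (pos + del + 1) 0
      else pvDeletions rest (pos + 1) del
    else pvDeletions rest pos del

-- accumulator-shifting helper for the induction below
lemma pvShift {X : Int × Int × Int × Int × List (List Int) × List (List Int)}
    {P Q P' Q' : List (List Int)}
    (h : ∃ a b c d, X = (a, b, c, d, P, Q)) (hP : P' = P) (hQ : Q' = Q) :
    ∃ a b c d, X = (a, b, c, d, P', Q') := by
  subst hP; subst hQ; exact h

-- A's fold over the pair list = the two independent state machines, accumulators prepended
lemma foldA_split (l : List (Char × Char)) (ipr ipq ins del : Int)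
    (lI lD : List (List Int)) :
    ∃ a b c d,
      l.foldl pvStepA (ipr, ipq, ins, del, lI, lD) =
        (a, b, c, d, lI ++ pvInsertions (l.map Prod.fst) ipr ins,
                     lD ++ pvDeletions (l.map Prod.snd) ipq del) := by
  induction l generalizing ipr ipq ins del lI lD with
  | nil => exact ⟨ipr, ipq, ins, del, by simp [pvInsertions, pvDeletions]⟩
  | cons p rest ih =>
    obtain ⟨c1, c2⟩ := p
    simp only [List.foldl_cons, List.map_cons, pvStepA]
    split_ifs <;>
      exact pvShift (ih _ _ _ _ _ _)
        (by simp_all [pvInsertions, List.append_assoc])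
        (by simp_all [pvDeletions, List.append_assoc])

lemma map_fst_zip_eq (a b : List Char) :
    ((a.zip b).map Prod.fst) = a.take (min a.length b.length) := by
  induction a generalizing b with
  | nil => simp
  | cons x xs ih =>
    cases b with
    | nil => simp
    | cons y ys => simp [List.zip_cons_cons, ih, Nat.succ_min_succ]

lemma map_snd_zip_eq (a b : List Char) :
    ((a.zip b).map Prod.snd) = b.take (min a.length b.length) := by
  induction a generalizing b with
  | nil => simp
  | cons x xs ih =>
    cases b with
    | nil => simp
    | cons y ys => simp [List.zip_cons_cons, ih, Nat.succ_min_succ]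


-- recursive form of the prefix-sum tail (proof helper)
def pvPfx : List Char → Int → List Int
  | [], _ => []
  | c :: rest, t =>
    (if c = '-' then t + 1 else t) :: pvPfx rest (if c = '-' then t + 1 else t)

lemma pvPrefix_fold (s : List Char) (t0 : Int) (l0 : List Int) :
    (s.foldl (fun (st : Int × List Int) c =>
        let t := if c = '-' then st.1 + 1 else st.1
        (t, st.2 ++ [t])) (t0, l0)).2 = l0 ++ pvPfx s t0 := by
  induction s generalizing t0 l0 with
  | nil => simp [pvPfx]
  | cons c rest ih =>
    rw [List.foldl_cons]
    dsimp only
    rw [ih]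
    simp [pvPfx]

lemma pvPfx_shift (s : List Char) (t e : Int) :
    pvPfx s (t + e) = (pvPfx s t).map (· + e) := by
  induction s generalizing t with
  | nil => simp [pvPfx]
  | cons c rest ih =>
    simp only [pvPfx, List.map_cons]
    have h : (if c = '-' then t + e + 1 else t + e) =
        (if c = '-' then t + 1 else t) + e := by split_ifs <;> ring
    rw [h, ih]

lemma pvPrefix_eq (s : List Char) : pvPrefix s = 0 :: pvPfx s 0 := by
  unfold pvPrefix
  rw [pvPrefix_fold]
  rfl

lemma pvPfx_length (s : List Char) (t : Int) : (pvPfx s t).length = s.length := by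
  induction s generalizing t with
  | nil => rfl
  | cons c rest ih => simp [pvPfx, ih]

-- structure lemma: pvPrefix of a cons
lemma pvPrefix_cons (c : Char) (s : List Char) :
    pvPrefix (c :: s) =
      0 :: (pvPrefix s).map (· + (if c = '-' then (1:Int) else 0)) := by
  have he : (if c = '-' then (0:Int) + 1 else 0) =
      0 + (if c = '-' then (1:Int) else 0) := by split_ifs <;> ring
  rw [pvPrefix_eq, pvPrefix_eq]
  simp only [pvPfx, List.map_cons]
  rw [he, pvPfx_shift]

-- enumerate with a shifted start index
lemma enumerate_shift (s : List Char) (k : Int) :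
    PySem.List.enumerate s (k + 1) =
      (PySem.List.enumerate s k).map (fun p => (p.1 + 1, p.2)) := by
  induction s generalizing k with
  | nil => simp [PySem.List.enumerate_nil]
  | cons c rest ih =>
    simp [PySem.List.enumerate_cons, ih (k + 1)]

-- structure lemma: pvMatchIdx of a cons
lemma pvMatchIdx_cons (c : Char) (s : List Char) :
    pvMatchIdx (c :: s) =
      (if pvIsACGT c then [(0:Int)] else []) ++ (pvMatchIdx s).map (· + 1) := by
  unfold pvMatchIdx
  rw [PySem.List.enumerate_cons, enumerate_shift s 0, List.filter_cons]
  by_cases hb : pvIsACGT c <;>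
    · simp [hb, List.filter_map, List.map_map]
      rfl

-- every match index is a nonnegative in-range index
lemma pvMatchIdx_mem_range (s : List Char) :
    ∀ i ∈ pvMatchIdx s, 0 ≤ i ∧ i < (s.length : Int) := by
  intro i hi
  unfold pvMatchIdx at hi
  simp only [List.mem_map, List.mem_filter] at hi
  obtain ⟨p, ⟨hp, _⟩, rfl⟩ := hi
  rw [PySem.List.mem_enumerate_iff] at hp
  obtain ⟨k, hk, rfl⟩ := hp
  dsimp only
  constructor <;> omega

lemma pvMatchIdx_lt_prefix (s : List Char) :
    ∀ i ∈ pvMatchIdx s, 0 ≤ i ∧ i < ((pvPrefix s).length : Int) := by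
  intro i hi
  obtain ⟨h0, hl⟩ := pvMatchIdx_mem_range s i hi
  rw [pvPrefix_eq]
  simp only [List.length_cons, pvPfx_length]
  constructor
  · exact h0
  · push_cast
    omega

-- shifting pvGapLoop through a cons of the prefix list:
-- reading (0 :: P.map (·+e)) at i+1 equals reading P at i, with prev shifted by e
lemma pvGapLoop_shift (P : List Int) (e : Int) (shift : Bool) (M : List Int)
    (hM : ∀ i ∈ M, 0 ≤ i ∧ i < (P.length : Int)) (k prev acc : Int) :
    pvGapLoop (0 :: P.map (· + e)) shift (M.map (· + 1)) k prev acc =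
      pvGapLoop P shift M k (prev - e) acc := by
  induction M generalizing k prev acc with
  | nil => simp [pvGapLoop]
  | cons i rest ih =>
    obtain ⟨h0, hlt⟩ := hM i (by simp)
    have hrest : ∀ j ∈ rest, 0 ≤ j ∧ j < (P.length : Int) :=
      fun j hj => hM j (List.mem_cons_of_mem _ hj)
    have hn : i.toNat < P.length := by omega
    have hL : PySem.List.pyGetD (0 :: P.map (· + e)) (i + 1) 0 = P[i.toNat] + e := by
      rw [show i + 1 = ((i.toNat + 1 : Nat) : Int) by omega,
          PySem.List.pyGetD_natCast, List.getD_cons_succ,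
          List.getD_eq_getElem?_getD, List.getElem?_map,
          List.getElem?_eq_getElem hn]
      rfl
    have hR : PySem.List.pyGetD P i 0 = P[i.toNat] := by
      conv_lhs => rw [show i = ((i.toNat : Nat) : Int) from by omega,
        PySem.List.pyGetD_natCast]
      rw [List.getD_eq_getElem?_getD, List.getElem?_eq_getElem hn]
      rfl
    have hget : PySem.List.pyGetD (0 :: P.map (· + e)) (i + 1) 0 =
        PySem.List.pyGetD P i 0 + e := by rw [hL, hR]
    simp only [List.map_cons, pvGapLoop, hget]
    rw [show PySem.List.pyGetD P i 0 + e - prev =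
        PySem.List.pyGetD P i 0 - (prev - e) from by ring]
    split_ifs <;>
      rw [ih hrest,
        show PySem.List.pyGetD P i 0 + e - e = PySem.List.pyGetD P i 0 from by ring]

-- the insertion state machine = B's gap-loop (shift = false)
lemma insertions_eq_gap (s : List Char) (k ins : Int) :
    pvInsertions s k ins =
      pvGapLoop (pvPrefix s) false (pvMatchIdx s) k (-ins) 0 := by
  induction s generalizing k ins with
  | nil => simp [pvInsertions, pvMatchIdx, PySem.List.enumerate_nil, pvGapLoop]
  | cons c rest ih =>
    rw [pvPrefix_cons, pvMatchIdx_cons]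
    by_cases hd : c = '-'
    · have hb : pvIsACGT c = false := by rw [hd]; rfl
      have he : (if c = '-' then (1:Int) else 0) = 1 := if_pos hd
      rw [he, hb]
      simp only [Bool.false_eq_true, if_false, List.nil_append]
      rw [pvGapLoop_shift _ _ _ _ (pvMatchIdx_lt_prefix rest)]
      simp only [pvInsertions]
      rw [if_pos hd, ih k (ins + 1),
        show -(ins + 1) = -ins - 1 from by ring]
    · by_cases hm : c = 'A' ∨ c = 'C' ∨ c = 'G' ∨ c = 'T'
      · have hb : pvIsACGT c = true := by
          rcases hm with rfl | rfl | rfl | rfl <;> rfl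
        have he : (if c = '-' then (1:Int) else 0) = 0 := if_neg hd
        rw [he, hb]
        simp only [if_true, List.singleton_append]
        simp only [pvInsertions]
        rw [if_neg hd, if_pos hm]
        simp only [pvGapLoop, PySem.List.pyGetD_zero_cons,
          Bool.false_eq_true, if_false]
        rw [show (0 : Int) - -ins = ins from by ring]
        split_ifs with h
        · rw [pvGapLoop_shift _ _ _ _ (pvMatchIdx_lt_prefix rest), ih (k + 1) 0]
          norm_num
        · have h0 : ins = 0 := not_not.mp h
          rw [h0, pvGapLoop_shift _ _ _ _ (pvMatchIdx_lt_prefix rest), ih (k + 1) 0]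
          norm_num
      · have hb : pvIsACGT c = false := by
          simp only [pvIsACGT]
          simp only [not_or] at hm
          simp [hm.1, hm.2.1, hm.2.2.1, hm.2.2.2]
        have he : (if c = '-' then (1:Int) else 0) = 0 := if_neg hd
        rw [he, hb]
        simp only [Bool.false_eq_true, if_false, List.nil_append]
        rw [pvGapLoop_shift _ _ _ _ (pvMatchIdx_lt_prefix rest)]
        simp only [pvInsertions]
        rw [if_neg hd, if_neg hm, ih k ins,
          show -ins - 0 = -ins from by ring]

-- the deletion state machine = B's gap-loop (shift = true); pos = k + acc
lemma deletions_eq_gap (s : List Char) (k acc del : Int) :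
    pvDeletions s (k + acc) del =
      pvGapLoop (pvPrefix s) true (pvMatchIdx s) k (-del) acc := by
  induction s generalizing k acc del with
  | nil => simp [pvDeletions, pvMatchIdx, PySem.List.enumerate_nil, pvGapLoop]
  | cons c rest ih =>
    rw [pvPrefix_cons, pvMatchIdx_cons]
    by_cases hd : c = '-'
    · have hb : pvIsACGT c = false := by rw [hd]; rfl
      have he : (if c = '-' then (1:Int) else 0) = 1 := if_pos hd
      rw [he, hb]
      simp only [Bool.false_eq_true, if_false, List.nil_append]
      rw [pvGapLoop_shift _ _ _ _ (pvMatchIdx_lt_prefix rest)]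
      simp only [pvDeletions]
      rw [if_pos hd, ih k acc (del + 1),
        show -(del + 1) = -del - 1 from by ring]
    · by_cases hm : c = 'A' ∨ c = 'C' ∨ c = 'G' ∨ c = 'T'
      · have hb : pvIsACGT c = true := by
          rcases hm with rfl | rfl | rfl | rfl <;> rfl
        have he : (if c = '-' then (1:Int) else 0) = 0 := if_neg hd
        rw [he, hb]
        simp only [if_true, List.singleton_append]
        simp only [pvDeletions]
        rw [if_neg hd, if_pos hm]
        simp only [pvGapLoop, PySem.List.pyGetD_zero_cons, if_true]
        rw [show (0 : Int) - -del = del from by ring]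
        split_ifs with h
        · rw [pvGapLoop_shift _ _ _ _ (pvMatchIdx_lt_prefix rest)]
          have := ih (k + 1) (acc + del) 0
          rw [show k + acc + del + 1 = (k + 1) + (acc + del) from by ring, this]
          norm_num
        · have h0 : del = 0 := not_not.mp h
          rw [h0, pvGapLoop_shift _ _ _ _ (pvMatchIdx_lt_prefix rest)]
          have := ih (k + 1) acc 0
          rw [show k + acc + 1 = (k + 1) + acc from by ring, this]
          norm_num
      · have hb : pvIsACGT c = false := by
          simp only [pvIsACGT]
          simp only [not_or] at hm
          simp [hm.1, hm.2.1, hm.2.2.1, hm.2.2.2]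
        have he : (if c = '-' then (1:Int) else 0) = 0 := if_neg hd
        rw [he, hb]
        simp only [Bool.false_eq_true, if_false, List.nil_append]
        rw [pvGapLoop_shift _ _ _ _ (pvMatchIdx_lt_prefix rest)]
        simp only [pvDeletions]
        rw [if_neg hd, if_neg hm, ih k acc del,
          show -del - 0 = -del from by ring]

-- ===== VERDICT (by name: the statement is the Claim_ definition above) =====
theorem MakeIndelPosInfo_py_spec : Claim_equal_MakeIndelPosInfo_py := by
  intro r q _
  unfold Spec_MakeIndelPosInfo_py MakeIndelPosInfo_py MakeIndelPosInfo_py_alt pvGapEntries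
  obtain ⟨a, b, c, d, he⟩ := foldA_split (r.toList.zip q.toList) 0 0 0 0 [] []
  simp only [he, map_fst_zip_eq, map_snd_zip_eq, List.nil_append]
  have h1 := insertions_eq_gap
    (r.toList.take (min r.toList.length q.toList.length)) 0 0
  have h2 := deletions_eq_gap
    (q.toList.take (min r.toList.length q.toList.length)) 0 0 0
  rw [neg_zero] at h1 h2
  rw [add_zero] at h2
  rw [h1, h2]
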